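-- pv_equiv track=rewrite | github.com/pce/sdlos | tooling/src/sdlos/features/docblocks.py | _lookup_type
-- ===== SOURCE A (Python) =====
-- def _lookup_type(type_spell: str, taxonomy: dict[str, str]) -> str:
--     """Substring match for a C++ type spelling in *taxonomy*.
--
--     Parameters
--     ----------
--     type_spell:
--         Full canonical type spelling (e.g. ``"std::vector<int>"``).
--     taxonomy:
--         ``type_taxonomy`` dict from the knowledge pack.
--
--     Returns
--     -------
--     str
--         Human-readable type description or an empty string.
--     """
--     best_key  = ""
--     best_desc = ""
--     for key, desc in taxonomy.items():
--         if key in type_spell and len(key) > len(best_key):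
--             best_key  = key
--             best_desc = desc
--     return best_desc
-- ===== SOURCE B (Python) =====
-- def _lookup_type(type_spell: str, taxonomy: dict[str, str]) -> str:
--     matches = [(k, d) for k, d in taxonomy.items() if k and k in type_spell]
--     if not matches:
--         return ""
--     m = max(len(k) for k, _ in matches)
--     return next(d for k, d in matches if len(k) == m)
-- ===== Notes on version B (the rewrite author's own statement) =====
-- stated objective: alternative
-- what changed: Replaces the single pass that tracks a running best (key, desc) pair with a filter of the matching keys, a separate max over their lengths, and a first-hit scan for that length.
import Mathlib
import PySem

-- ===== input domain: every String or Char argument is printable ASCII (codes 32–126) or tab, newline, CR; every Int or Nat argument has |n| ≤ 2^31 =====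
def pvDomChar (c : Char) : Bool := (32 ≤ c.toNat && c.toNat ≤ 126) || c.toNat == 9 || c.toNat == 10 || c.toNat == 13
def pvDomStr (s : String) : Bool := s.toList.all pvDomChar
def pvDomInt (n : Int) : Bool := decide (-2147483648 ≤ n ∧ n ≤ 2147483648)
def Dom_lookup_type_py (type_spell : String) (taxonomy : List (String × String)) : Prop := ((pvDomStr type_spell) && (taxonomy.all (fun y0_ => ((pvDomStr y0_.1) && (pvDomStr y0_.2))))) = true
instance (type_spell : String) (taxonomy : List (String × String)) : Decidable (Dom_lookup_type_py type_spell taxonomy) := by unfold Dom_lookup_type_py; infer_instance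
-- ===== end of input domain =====

-- B replaces A's running-best fold with filter + max-of-lengths + first-hit scan (alternative decomposition, same cost).

-- ===== PORT A =====
-- literal port of A: one pass keeping the (best_key, best_desc) pair, replaced on strictly longer matching key
def lookup_type_py (type_spell : String) (taxonomy : List (String × String)) : String :=
  (taxonomy.foldl
    (fun (best : String × String) kd =>
      if PySem.Str.isIn kd.1 type_spell = true ∧ PySem.Str.len best.1 < PySem.Str.len kd.1
      then kd else best)
    ("", "")).2

-- ===== PORT B =====
-- literal port of Source B: filter the matching nonempty keys, take max of their lengths, return first with that length
def lookup_type_py_alt (type_spell : String) (taxonomy : List (String × String)) : String :=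
  let ms := taxonomy.filter (fun kd => (kd.1 != "") && PySem.Str.isIn kd.1 type_spell)
  match ms with
  | [] => ""
  | _ :: _ =>
    match PySem.List.max? (ms.map (fun kd => PySem.Str.len kd.1)) (fun x => x) with
    | none => ""
    | some m =>
      match ms.find? (fun kd => PySem.Str.len kd.1 == m) with
      | some kd => kd.2
      | none => ""

-- ===== PRECONDITION & SPEC =====
def Spec_lookup_type_py (type_spell : String) (taxonomy : List (String × String)) (out : String) : Prop := out = lookup_type_py_alt type_spell taxonomy
instance (type_spell : String) (taxonomy : List (String × String)) (out : String) : Decidable (Spec_lookup_type_py type_spell taxonomy out) := by unfold Spec_lookup_type_py; infer_instance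

-- ===== CLAIM (what is proved, stated in full; the proofs are below) =====
def Claim_equal_lookup_type_py : Prop := ∀ (type_spell : String) (taxonomy : List (String × String)), Dom_lookup_type_py type_spell taxonomy → Spec_lookup_type_py type_spell taxonomy (lookup_type_py type_spell taxonomy)

-- ===== LEMMAS AND PROOFS =====

-- the pure length-comparison step B's characterisation is proved against
def pvStep (b kd : String × String) : String × String :=
  if PySem.Str.len b.1 < PySem.Str.len kd.1 then kd else b

lemma pvLen_nonneg (s : String) : 0 ≤ PySem.Str.len s := by
  simp [PySem.Str.len_eq]

lemma pvLen_pos (s : String) (h : s ≠ "") : 0 < PySem.Str.len s := by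
  simp only [PySem.Str.len_eq]
  have hne : s.toList ≠ [] := fun hn => h (String.ext (by simp [hn]))
  have := List.length_pos_iff.mpr hne
  omega

-- A's fold over the full list equals the pure fold over the filtered ms
lemma pvFold_filter (t : String) (l : List (String × String)) (b : String × String) :
    l.foldl
      (fun (best : String × String) kd =>
        if PySem.Str.isIn kd.1 t = true ∧ PySem.Str.len best.1 < PySem.Str.len kd.1
        then kd else best) b
    = (l.filter (fun kd => (kd.1 != "") && PySem.Str.isIn kd.1 t)).foldl pvStep b := by
  induction l generalizing b with
  | nil => rfl
  | cons kd l ih =>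
    simp only [List.foldl_cons, List.filter_cons]
    by_cases hk : ((kd.1 != "") && PySem.Str.isIn kd.1 t) = true
    · obtain ⟨hne, hin⟩ : (kd.1 != "") = true ∧ PySem.Str.isIn kd.1 t = true := by
        simpa using hk
      rw [if_pos hk, List.foldl_cons, ih]
      congr 1
      have hin' : PySem.Chars.isIn kd.1.toList t.toList = true := by simpa using hin
      simp [pvStep, hin']
    · rw [if_neg hk, ih]
      congr 1
      have hcond : ¬(PySem.Str.isIn kd.1 t = true ∧ PySem.Str.len b.1 < PySem.Str.len kd.1) := by
        rintro ⟨hin, hlt⟩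
        simp only [hin, Bool.and_true] at hk
        have hempty : kd.1 = "" := by simpa using hk
        have h0 := pvLen_nonneg b.1
        rw [hempty] at hlt
        simp only [PySem.Str.len_eq] at hlt h0
        simp at hlt
        omega
      rw [if_neg hcond]

lemma pvFold_stay (l : List (String × String)) (b : String × String)
    (h : ∀ kd ∈ l, PySem.Str.len kd.1 ≤ PySem.Str.len b.1) :
    l.foldl pvStep b = b := by
  induction l generalizing b with
  | nil => rfl
  | cons kd l ih =>
    have hle := h kd (by simp)
    simp only [List.foldl_cons, pvStep, if_neg (not_lt.mpr hle)]
    exact ih b (fun e he => h e (by simp [he]))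

-- the fold picks exactly the first element of maximal key length
lemma pvFold_find (l : List (String × String)) (b : String × String) (m : Int)
    (hub : ∀ kd ∈ l, PySem.Str.len kd.1 ≤ m)
    (hex : ∃ kd ∈ l, PySem.Str.len kd.1 = m)
    (hb : PySem.Str.len b.1 < m) :
    l.find? (fun kd => PySem.Str.len kd.1 == m) = some (l.foldl pvStep b) := by
  induction l generalizing b with
  | nil => rcases hex with ⟨kd, hkd, _⟩; simp at hkd
  | cons kd l ih =>
    simp only [List.foldl_cons]
    by_cases hm : PySem.Str.len kd.1 = m
    · rw [List.find?_cons_of_pos (by simpa using hm)]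
      have hlt : PySem.Str.len b.1 < PySem.Str.len kd.1 := hm ▸ hb
      have hstep : pvStep b kd = kd := by
        simp only [pvStep, if_pos hlt]
      rw [hstep, pvFold_stay l kd (fun e he => by
        have := hub e (by simp [he]); omega)]
    · rw [List.find?_cons_of_neg (by simpa using hm)]
      have hb' : PySem.Str.len (pvStep b kd).1 < m := by
        have hk := hub kd (by simp)
        by_cases hlt : PySem.Str.len b.1 < PySem.Str.len kd.1
        · simp only [pvStep, if_pos hlt]; omega
        · simp only [pvStep, if_neg hlt]; exact hb
      rcases hex with ⟨e, he, hem⟩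
      rcases List.mem_cons.mp he with rfl | he'
      · exact absurd hem hm
      · exact ih (pvStep b kd) (fun e' he' => hub e' (by simp [he'])) ⟨e, he', hem⟩ hb' 

-- ===== VERDICT (by name: the statement is the Claim_ definition above) =====
theorem lookup_type_py_spec : Claim_equal_lookup_type_py := by
  intro t tax _
  unfold Spec_lookup_type_py lookup_type_py lookup_type_py_alt
  rw [pvFold_filter]
  cases hms : tax.filter (fun kd => (kd.1 != "") && PySem.Str.isIn kd.1 t) with
  | nil => simp
  | cons kd rest =>
    have hne : (kd :: rest).map (fun kd => PySem.Str.len kd.1) ≠ [] := by simp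
    cases hmax : PySem.List.max? ((kd :: rest).map (fun kd => PySem.Str.len kd.1)) (fun x => x) with
    | none => exact absurd ((PySem.List.max?_eq_none_iff _ _).mp hmax) hne
    | some m =>
      have hub : ∀ e ∈ kd :: rest, PySem.Str.len e.1 ≤ m := by
        intro e he
        have := PySem.List.max?_isMax hmax (PySem.Str.len e.1) (List.mem_map_of_mem he)
        simpa using this
      have hex : ∃ e ∈ kd :: rest, PySem.Str.len e.1 = m := by
        have hmem := PySem.List.max?_mem hmax
        rcases List.mem_map.mp hmem with ⟨e, he, heq⟩
        exact ⟨e, he, heq⟩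
      have hb : PySem.Str.len ("" : String) < m := by
        rcases hex with ⟨e, he, hem⟩
        have hmemf : e ∈ tax.filter (fun kd => (kd.1 != "") && PySem.Str.isIn kd.1 t) := hms ▸ he
        have := (List.mem_filter.mp hmemf).2
        have hene : e.1 ≠ "" := by simpa using (Bool.and_elim_left this)
        have hpos := pvLen_pos e.1 hene
        have h0 : PySem.Str.len ("" : String) = 0 := by simp [PySem.Str.len_eq]
        omega
      have hfind := pvFold_find (kd :: rest) ("", "") m hub hex hb
      simp only [hmax, hfind]
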